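-- pv_equiv track=rewrite | github.com/alokkulkarni/awsagentcore | api/webrtc/auth.py | _is_principal_allowed
-- ===== SOURCE A (Python) =====
-- def _is_principal_allowed(caller_arn: str, allowed: list[str]) -> bool:
--     """
--     Check whether ``caller_arn`` matches any pattern in ``allowed``.
--
--     Supports exact matches and prefix wildcards ending with ``/*``, e.g.:
--       "arn:aws:sts::395402194296:assumed-role/aria-webrtc-client-role/*"
--
--     The trailing ``/*`` is replaced with a prefix check so that any session
--     name under the role is accepted.
--     """
--     for pattern in allowed:
--         if pattern.endswith("/*"):
--             if caller_arn.startswith(pattern[:-2]):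
--                 return True
--         elif caller_arn == pattern:
--             return True
--     return False
-- ===== SOURCE B (Python) =====
-- def _is_principal_allowed(caller_arn: str, allowed: list[str]) -> bool:
--     """Invert A's scan: hash the allowed patterns once, then probe that set with
--     the only patterns that could possibly match ``caller_arn`` — the ARN itself,
--     and ``caller_arn[:L-2] + "/*"`` for each pattern length L present (the one
--     wildcard of that length able to match) — no per-pattern inspection at all."""
--     allowed_set = set(allowed)
--     if caller_arn in allowed_set:
--         return True
--     lengths = {len(p) for p in allowed_set}
--     return any(caller_arn[:L - 2] + "/*" in allowed_set
--                for L in lengths if 2 <= L <= len(caller_arn) + 2)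
-- ===== Notes on version B (the rewrite author's own statement) =====
-- stated objective: alternative
-- what changed: B inverts A's scan: instead of inspecting each pattern's structure (endswith-branch, strip, startswith) per entry, it hashes the allowed list into a set once and probes that set with the only candidates that could match the caller ARN (the ARN itself, and one prefix+'/*' candidate per distinct pattern length), replacing per-pattern string comparisons by a few set lookups.
import Mathlib
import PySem

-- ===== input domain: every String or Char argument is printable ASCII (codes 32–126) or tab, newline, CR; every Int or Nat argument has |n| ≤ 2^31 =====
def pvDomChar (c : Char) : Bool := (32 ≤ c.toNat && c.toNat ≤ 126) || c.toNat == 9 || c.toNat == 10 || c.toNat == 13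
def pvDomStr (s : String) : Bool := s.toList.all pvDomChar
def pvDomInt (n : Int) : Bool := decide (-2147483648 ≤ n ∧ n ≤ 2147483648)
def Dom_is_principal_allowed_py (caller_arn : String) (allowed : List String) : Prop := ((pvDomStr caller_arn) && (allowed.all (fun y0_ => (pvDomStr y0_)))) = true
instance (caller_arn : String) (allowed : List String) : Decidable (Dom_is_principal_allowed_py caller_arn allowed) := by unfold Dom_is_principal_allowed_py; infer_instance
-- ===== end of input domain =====

-- B inverts A's per-pattern structural scan: it hashes the allowed list once, then probes that set with the only candidate patterns derivable from the caller ARN (the ARN, and one prefix+"/*" candidate per distinct pattern length); a different algorithm of similar cost.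


-- ===== PORT A =====
-- literal transliteration of A's single loop with early returns
def is_principal_allowed_py (caller_arn : String) (allowed : List String) : Bool :=
  match allowed with
  | [] => false
  | pattern :: rest =>
    if PySem.Str.endswith pattern "/*" then
      if PySem.Str.startswith caller_arn (PySem.Str.slice pattern none (some (-2))) then
        true
      else
        is_principal_allowed_py caller_arn rest
    else if caller_arn == pattern then
      true
    else
      is_principal_allowed_py caller_arn rest

-- ===== PORT B =====
-- B: hash the allowed patterns once, then probe it with the one candidate per pattern length
-- (string work done on the .toList side, as PySem string functions are)
def is_principal_allowed_py_alt (caller_arn : String) (allowed : List String) : Bool :=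
  let allowedSet : PySem.Set (List Char) := PySem.Set.ofList (allowed.map String.toList)
  if PySem.Set.contains allowedSet caller_arn.toList then
    true
  else
    let lengths : PySem.Set Int := PySem.Set.ofList (allowedSet.map (fun p => (p.length : Int)))
    lengths.any (fun L =>
      (decide (2 ≤ L) && decide (L ≤ (caller_arn.toList.length : Int) + 2)) &&
      PySem.Set.contains allowedSet
        (PySem.List.slice caller_arn.toList none (some (L - 2)) ++ ['/', '*']))

-- ===== PRECONDITION & SPEC =====
def Spec_is_principal_allowed_py (caller_arn : String) (allowed : List String) (out : Bool) : Prop := out = is_principal_allowed_py_alt caller_arn allowed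
instance (caller_arn : String) (allowed : List String) (out : Bool) : Decidable (Spec_is_principal_allowed_py caller_arn allowed out) := by unfold Spec_is_principal_allowed_py; infer_instance

-- ===== CLAIM =====
def Claim_equal_is_principal_allowed_py : Prop := ∀ (caller_arn : String) (allowed : List String), Dom_is_principal_allowed_py caller_arn allowed → Spec_is_principal_allowed_py caller_arn allowed (is_principal_allowed_py caller_arn allowed)

-- ===== LEMMAS AND PROOFS =====

-- proof-only helper: the set of all patterns that could match s (the candidates B probes with)
def ipaCandidates (s : List Char) : PySem.Set (List Char) :=
  PySem.Set.add
    (PySem.Set.ofList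
      ((PySem.List.pyRange 0 ((s.length : Int) + 1) 1).map
        (fun i => PySem.List.slice s none (some i) ++ ['/', '*'])))
    s

-- membership in B's candidate set, characterised
lemma mem_ipaCandidates (s p : List Char) :
    p ∈ ipaCandidates s ↔ (∃ i : Nat, i ≤ s.length ∧ p = s.take i ++ ['/', '*']) ∨ p = s := by
  unfold ipaCandidates
  rw [PySem.Set.mem_add, PySem.Set.mem_ofList]
  constructor
  · rintro (h | h)
    · rcases List.mem_map.mp h with ⟨i, hi, rfl⟩
      rw [PySem.List.mem_pyRange_one] at hi
      refine Or.inl ⟨i.toNat, by omega, ?_⟩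
      rw [PySem.List.slice_to _ hi.1]
    · exact Or.inr h
  · rintro (⟨i, hi, rfl⟩ | rfl)
    · refine Or.inl (List.mem_map.mpr ⟨(i : Int), ?_, ?_⟩)
      · rw [PySem.List.mem_pyRange_one]; omega
      · rw [PySem.List.slice_to _ (by omega), Int.toNat_natCast]
    · exact Or.inr rfl

-- A's per-pattern test (on the char-list side) decides exactly membership in B's candidate set
lemma ipa_match_iff (s p : List Char) :
    ((if PySem.Chars.endswith p ['/', '*'] then
        PySem.Chars.startswith s (PySem.List.slice p none (some (-2)))
      else
        decide (s = p)) = true)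
    ↔ p ∈ ipaCandidates s := by
  rw [mem_ipaCandidates]
  by_cases he : PySem.Chars.endswith p ['/', '*'] = true
  · rcases (PySem.Chars.endswith_iff _ _).mp he with ⟨q, rfl⟩
    rw [if_pos he, PySem.List.slice_to_neg_ofNat _ 2 (by omega)]
    have hq : (q ++ ['/', '*']).take ((q ++ ['/', '*']).length - 2) = q := by
      simp [List.take_left']
    rw [hq, PySem.Chars.startswith_iff, List.prefix_iff_eq_take]
    constructor
    · intro h
      refine Or.inl ⟨q.length, ?_, by rw [← h]⟩
      have := congrArg List.length h
      simp at this; omega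
    · rintro (⟨i, hi, heq⟩ | heq)
      · obtain rfl : q = s.take i := List.append_cancel_right heq
        simp [Nat.min_eq_left hi]
      · exact List.prefix_iff_eq_take.mp ⟨['/', '*'], heq⟩
  · rw [if_neg he]
    simp only [decide_eq_true_eq]
    constructor
    · rintro rfl; exact Or.inr rfl
    · rintro (⟨i, hi, rfl⟩ | rfl)
      · exact absurd ((PySem.Chars.endswith_iff _ _).mpr ⟨s.take i, rfl⟩) he
      · rfl

-- A's String-level per-pattern test equals B's set-membership test
lemma str_match_eq_contains (caller_arn pattern : String) :
    (if PySem.Str.endswith pattern "/*" then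
       PySem.Str.startswith caller_arn (PySem.Str.slice pattern none (some (-2)))
     else
       caller_arn == pattern)
    = PySem.Set.contains (ipaCandidates caller_arn.toList) pattern.toList := by
  have htl : ("/*" : String).toList = ['/', '*'] := by decide
  have hbeq : (caller_arn == pattern) = decide (caller_arn.toList = pattern.toList) := by
    rw [Bool.eq_iff_iff]; simp [String.toList_inj]
  rw [Bool.eq_iff_iff, PySem.Set.contains_iff, ← ipa_match_iff]
  simp only [PySem.Str.endswith_eq, PySem.Str.startswith_eq, PySem.Str.toList_slice,
    PySem.Chars.slice_eq_listSlice, htl, hbeq]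

-- the loop of A, summarised: any pattern in B's candidate set
lemma ipa_eq (caller_arn : String) (allowed : List String) :
    is_principal_allowed_py caller_arn allowed
    = allowed.any (fun pattern => PySem.Set.contains (ipaCandidates caller_arn.toList) pattern.toList) := by
  induction allowed with
  | nil => simp [is_principal_allowed_py]
  | cons pattern rest ih =>
    rw [is_principal_allowed_py, List.any_cons, ← str_match_eq_contains caller_arn pattern, ih]
    split_ifs with h1 h2 h3 <;> simp_all

-- the two phases of B, summarised the same way
lemma alt_iff (caller_arn : String) (allowed : List String) :
    is_principal_allowed_py_alt caller_arn allowed = true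
    ↔ ∃ p ∈ allowed, p.toList ∈ ipaCandidates caller_arn.toList := by
  simp only [is_principal_allowed_py_alt]
  by_cases hc : PySem.Set.contains (PySem.Set.ofList (allowed.map String.toList)) caller_arn.toList = true
  · rw [if_pos hc]
    simp only [true_iff]
    rw [PySem.Set.contains_iff, PySem.Set.mem_ofList, List.mem_map] at hc
    rcases hc with ⟨p, hp, hpe⟩
    exact ⟨p, hp, (mem_ipaCandidates _ _).mpr (Or.inr hpe)⟩
  · rw [if_neg hc]
    rw [PySem.Set.contains_iff, PySem.Set.mem_ofList, List.mem_map] at hc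
    simp only [List.any_eq_true, PySem.Set.mem_ofList, List.mem_map, Bool.and_eq_true,
      decide_eq_true_eq, PySem.Set.contains_iff]
    constructor
    · rintro ⟨L, hL, ⟨⟨h2, hle⟩, p, hp, hpe⟩⟩
      refine ⟨p, hp, (mem_ipaCandidates _ _).mpr (Or.inl ⟨(L - 2).toNat, by omega, ?_⟩)⟩
      rw [hpe, PySem.List.slice_to _ (by omega)]
    · rintro ⟨p, hp, hmem⟩
      rcases (mem_ipaCandidates _ _).mp hmem with ⟨i, hi, he⟩ | he
      · refine ⟨((i : Int) + 2), ⟨p.toList, ⟨p, hp, rfl⟩, ?_⟩, ⟨by omega, by omega⟩, p, hp, ?_⟩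
        · have hll : caller_arn.toList.length = caller_arn.length := by simp
          rw [he]
          simp
          omega
        · rw [PySem.List.slice_to _ (by omega), he]
          have h2 : (((i : Int) + 2) - 2).toNat = i := by omega
          rw [h2]
      · exact absurd ⟨p, hp, he⟩ hc

-- ===== VERDICT =====
theorem is_principal_allowed_py_spec : Claim_equal_is_principal_allowed_py := by
  intro caller_arn allowed _
  unfold Spec_is_principal_allowed_py
  rw [Bool.eq_iff_iff, ipa_eq]
  refine Iff.trans ?_ (alt_iff caller_arn allowed).symm
  simp [List.any_eq_true]
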